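-- pv_equiv track=rewrite | github.com/m8ttt/CS333-Final-Projct | PA2.py | LowerAndConsiderQuotes
-- ===== SOURCE A (Python) =====
-- class WrongSingleQuotes (Exception):
--     pass
--
-- def LowerAndConsiderQuotes(sentence):
--      quote_count = 0
--      new_sentence = ''
--
--      for word in sentence:
--         if(word == "'"):
--            quote_count = quote_count + 1
--         if(quote_count % 2 == 0):
--             new_sentence = new_sentence + word.lower()
--         else:
--             new_sentence = new_sentence + word
--
--         new_sentence = new_sentence.replace("'", '')
--      if(quote_count % 2 != 0):
--         raise WrongSingleQuotes
--      return new_sentence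
-- ===== SOURCE B (Python) =====
-- class WrongSingleQuotes(Exception):
--     pass
--
-- def LowerAndConsiderQuotes(sentence):
--     parts = sentence.split("'")
--     if (len(parts) - 1) % 2 != 0:
--         raise WrongSingleQuotes
--     return ''.join(p.lower() if i % 2 == 0 else p for i, p in enumerate(parts))
-- ===== Notes on version B (the rewrite author's own statement) =====
-- stated objective: simpler
-- what changed: B splits the sentence on the quote character once and lowercases the even-indexed segments (text outside quotes) while keeping odd-indexed segments verbatim, joining them back; A instead walks character by character toggling a quote-parity counter and re-running str.replace on the whole accumulated string at every step.
import Mathlib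
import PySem

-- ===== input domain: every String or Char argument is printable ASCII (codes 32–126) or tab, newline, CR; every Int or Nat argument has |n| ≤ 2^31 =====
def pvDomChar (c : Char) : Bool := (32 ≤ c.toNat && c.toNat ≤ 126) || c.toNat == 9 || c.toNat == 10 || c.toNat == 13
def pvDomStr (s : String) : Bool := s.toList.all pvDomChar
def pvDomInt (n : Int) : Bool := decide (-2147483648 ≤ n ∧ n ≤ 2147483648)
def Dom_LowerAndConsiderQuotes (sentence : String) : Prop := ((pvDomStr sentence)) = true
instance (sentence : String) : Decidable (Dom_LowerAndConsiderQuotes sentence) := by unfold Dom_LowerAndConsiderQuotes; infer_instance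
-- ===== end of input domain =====

-- B replaces A's per-character parity loop (which re-runs str.replace on the whole
-- accumulator every step) by one split on "'" with segment-wise lowercasing; simpler and O(n).


-- ===== PORT A =====
-- one loop iteration: maybe bump the quote count, append the (maybe lowercased) char,
-- then new_sentence.replace("'", '') — replacing the single char "'" by '' is exactly
-- removing every quote, ported as List.filter (exact).
def pvStepA (st : Nat × List Char) (c : Char) : Nat × List Char :=
  let q := if c = '\'' then st.1 + 1 else st.1
  let acc := if q % 2 = 0 then st.2 ++ [PySem.Chars.lowerChar c] else st.2 ++ [c]
  (q, acc.filter (fun x => x ≠ '\''))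

def LowerAndConsiderQuotes (sentence : String) : String :=
  String.ofList ((sentence.toList.foldl pvStepA (0, [])).2)

-- ===== PORT B =====
-- sentence.split("'") for the one-character separator "'": Python-exact
-- (keeps empty pieces, always returns at least one piece).
def pvSplitQ : List Char → List (List Char)
  | [] => [[]]
  | c :: t =>
    match pvSplitQ t with
    | [] => [[]]                                   -- unreachable: pvSplitQ never returns []
    | s :: rest => if c = '\'' then [] :: s :: rest else (c :: s) :: rest

-- ''.join(p.lower() if i % 2 == 0 else p for i, p in enumerate(parts))
def pvJoinAlt : List (List Char) → Nat → List Char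
  | [], _ => []
  | p :: rest, i => (if i % 2 = 0 then PySem.Chars.lower p else p) ++ pvJoinAlt rest (i + 1)

def LowerAndConsiderQuotes_alt (sentence : String) : String :=
  String.ofList (pvJoinAlt (pvSplitQ sentence.toList) 0)

-- ===== PRECONDITION & SPEC =====
-- A (and B) raise WrongSingleQuotes when the number of single quotes is odd; Pre_ excludes exactly those inputs.
def Pre_LowerAndConsiderQuotes (sentence : String) : Prop :=
  (sentence.toList.count '\'') % 2 = 0
instance (sentence : String) : Decidable (Pre_LowerAndConsiderQuotes sentence) := by
  unfold Pre_LowerAndConsiderQuotes; infer_instance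

def pvWitness_LowerAndConsiderQuotes : String := "He said 'KEEP This' OK"

def Spec_LowerAndConsiderQuotes (sentence : String) (out : String) : Prop :=
  out = LowerAndConsiderQuotes_alt sentence
instance (sentence : String) (out : String) : Decidable (Spec_LowerAndConsiderQuotes sentence out) := by
  unfold Spec_LowerAndConsiderQuotes; infer_instance

-- ===== CLAIM (what is proved, stated in full; the proofs are below) =====
def Claim_equal_LowerAndConsiderQuotes : Prop :=
  ∀ (sentence : String), Dom_LowerAndConsiderQuotes sentence →
    Pre_LowerAndConsiderQuotes sentence →
    Spec_LowerAndConsiderQuotes sentence (LowerAndConsiderQuotes sentence)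

-- ===== LEMMAS AND PROOFS =====

-- what A's loop produces for the remaining characters, starting at quote-parity q
def pvRest (q : Nat) : List Char → List Char
  | [] => []
  | c :: t =>
    if c = '\'' then pvRest (q + 1) t
    else (if q % 2 = 0 then [PySem.Chars.lowerChar c] else [c]) ++ pvRest q t

theorem pvLowerChar_ne_quote {c : Char} (h : c ≠ '\'') : PySem.Chars.lowerChar c ≠ '\'' := by
  unfold PySem.Chars.lowerChar
  split
  · rename_i hU
    simp only [PySem.Chars.isupper, Bool.and_eq_true, decide_eq_true_eq] at hU
    obtain ⟨h1, h2⟩ := hU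
    have hA : 65 ≤ c.toNat := by simp [Char.le_def, UInt32.le_iff_toNat_le] at h1; omega
    have hZ : c.toNat ≤ 90 := by simp [Char.le_def, UInt32.le_iff_toNat_le] at h2; omega
    have hval : Nat.isValidChar (c.toNat + 32) := Or.inl (by omega)
    intro heq
    have hnat := congrArg Char.toNat heq
    rw [Char.toNat_ofNat, if_pos hval] at hnat
    have hq : ('\'' : Char).toNat = 39 := by decide
    omega
  · exact h

theorem pvLowerChar_quote : PySem.Chars.lowerChar '\'' = '\'' := by decide

theorem pvFoldA (l : List Char) :
    ∀ (q : Nat) (acc : List Char), (∀ a ∈ acc, a ≠ '\'') →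
      (l.foldl pvStepA (q, acc)).2 = acc ++ pvRest q l := by
  induction l with
  | nil => intro q acc _; simp [pvRest]
  | cons c t ih =>
    intro q acc h
    have hfa : acc.filter (fun x => x ≠ '\'') = acc := by
      rw [List.filter_eq_self]; intro a ha; simpa using h a ha
    by_cases hc : c = '\''
    · subst hc
      have hstep : pvStepA (q, acc) '\'' = (q + 1, acc) := by
        by_cases hq : (q + 1) % 2 = 0 <;>
          simp [pvStepA, hq, List.filter_append, pvLowerChar_quote, List.filter] <;>
          exact fun a ha => h a ha
      simp only [List.foldl_cons, hstep]
      rw [ih (q + 1) acc h]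
      simp [pvRest]
    · have hstep : pvStepA (q, acc) c =
          (q, acc ++ (if q % 2 = 0 then [PySem.Chars.lowerChar c] else [c])) := by
        simp only [pvStepA, if_neg hc]
        split_ifs with hq <;>
          simp [List.filter_append, List.filter, pvLowerChar_ne_quote hc, hc] <;>
          exact fun a ha => h a ha
      have h2 : ∀ a ∈ acc ++ (if q % 2 = 0 then [PySem.Chars.lowerChar c] else [c]), a ≠ '\'' := by
        intro a ha
        rcases List.mem_append.1 ha with h1 | h1
        · exact h a h1
        · split at h1 <;> simp at h1 <;> subst h1
          · exact pvLowerChar_ne_quote hc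
          · exact hc
      simp only [List.foldl_cons, hstep]
      rw [ih q _ h2]
      simp [pvRest, hc]

theorem pvSplitQ_ne_nil (l : List Char) : pvSplitQ l ≠ [] := by
  cases l with
  | nil => simp [pvSplitQ]
  | cons c t =>
    unfold pvSplitQ
    cases pvSplitQ t with
    | nil => simp
    | cons s rest =>
      by_cases hc : c = '\'' <;> simp [hc]

theorem pvRest_eq_join (l : List Char) :
    ∀ (q i : Nat), i % 2 = q % 2 →
      pvRest q l = pvJoinAlt (pvSplitQ l) i := by
  induction l with
  | nil =>
    intro q i _
    simp [pvRest, pvSplitQ, pvJoinAlt, PySem.Chars.lower]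
  | cons c t ih =>
    intro q i hpar
    by_cases hc : c = '\''
    · subst hc
      obtain ⟨s, rest, hs⟩ := List.exists_cons_of_ne_nil (pvSplitQ_ne_nil t)
      simp only [pvSplitQ, pvRest, hs]
      rw [ih (q + 1) (i + 1) (by omega)]
      simp [pvJoinAlt, hs, PySem.Chars.lower]
    · obtain ⟨s, rest, hs⟩ := List.exists_cons_of_ne_nil (pvSplitQ_ne_nil t)
      simp only [pvSplitQ, pvRest, if_neg hc, hs]
      rw [ih q i hpar]
      by_cases hi : i % 2 = 0 <;>
        simp [pvJoinAlt, hs, hi, hpar ▸ hi, PySem.Chars.lower]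

-- ===== VERDICT (by name: the statement is the Claim_ definition above) =====
theorem LowerAndConsiderQuotes_spec : Claim_equal_LowerAndConsiderQuotes := by
  intro s _ _
  unfold Spec_LowerAndConsiderQuotes LowerAndConsiderQuotes LowerAndConsiderQuotes_alt
  rw [pvFoldA s.toList 0 [] (by simp)]
  rw [pvRest_eq_join s.toList 0 0 rfl]
  simp
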